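-- pv_equiv track=rewrite | github.com/ludwings0330/algo | coding-test/toss_next/4.py | solution
-- ===== SOURCE A (Python) =====
-- from collections import defaultdict
--
-- def solution(invitationPairs):
--     answer = []
--     graph = defaultdict(list)
--
--     # s 가 e 를 초대
--     for s, e in invitationPairs:
--         graph[s].append(e)
--
--     scores = defaultdict(int)
--     for current in graph.keys():
--         scores[current] += 10 * len(graph[current])
--         for next in graph[current]:
--             if next in graph:
--                 scores[current] += 3 * len(graph[next])
--                 for nextnext in graph[next]:
--                     if nextnext in graph:
--                         scores[current] += len(graph[nextnext])
--
--     scores = sorted(scores.items(), key=lambda x: x[1], reverse = True)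
--     return [x[0] for x in scores[:3]]
-- ===== SOURCE B (Python) =====
-- def solution(invitationPairs):
--     # Single-pass aggregation: per-node out-degree, then neighbor-degree sums,
--     # then scores -- no adjacency lists and no nested 3-hop scans.
--     deg = {}
--     for s, _ in invitationPairs:
--         deg[s] = deg.get(s, 0) + 1
--     nbrsum = {}
--     for s, e in invitationPairs:
--         nbrsum[s] = nbrsum.get(s, 0) + deg.get(e, 0)
--     score = {}
--     for s, e in invitationPairs:
--         score[s] = score.get(s, 10 * deg[s] + 3 * nbrsum[s]) + nbrsum.get(e, 0)
--     ranked = sorted(score.items(), key=lambda x: x[1], reverse=True)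
--     return [name for name, _ in ranked[:3]]
-- ===== Notes on version B (the rewrite author's own statement) =====
-- stated objective: faster
-- what changed: A builds adjacency lists and, for every node, rescans its 1-, 2- and 3-hop neighbor lists with a triple-nested loop; B never builds adjacency lists: it makes three single passes over the edge list (out-degree counter, neighbor-degree-sum per source, then score per source) and sorts once.
import Mathlib
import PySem

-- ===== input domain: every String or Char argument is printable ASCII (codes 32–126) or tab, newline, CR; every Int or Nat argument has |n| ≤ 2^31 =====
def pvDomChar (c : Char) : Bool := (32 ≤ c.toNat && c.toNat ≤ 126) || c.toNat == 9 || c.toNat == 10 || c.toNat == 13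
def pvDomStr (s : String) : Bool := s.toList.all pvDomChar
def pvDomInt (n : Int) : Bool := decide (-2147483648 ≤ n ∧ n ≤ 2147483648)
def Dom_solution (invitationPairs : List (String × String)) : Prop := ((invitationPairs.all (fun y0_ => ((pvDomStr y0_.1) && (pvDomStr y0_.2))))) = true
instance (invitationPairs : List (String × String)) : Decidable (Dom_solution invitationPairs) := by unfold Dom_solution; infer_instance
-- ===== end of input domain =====

-- B replaces A's nested 3-hop scans over adjacency lists by three single passes over the
-- edge list (degree, neighbor-degree-sum, score); objective: faster (O(V·E+ nested hops) → O(E + V log V)).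

-- ===== PORT A =====
-- graph = defaultdict(list); for s, e in invitationPairs: graph[s].append(e)
def pvGraphA (invitationPairs : List (String × String)) : PySem.Dict String (List String) :=
  invitationPairs.foldl (fun g p => g.modify p.1 [] (fun l => l ++ [p.2])) PySem.Dict.empty

-- scores = defaultdict(int); triple-nested loop of 'scores[current] += …'
def pvScoresA (invitationPairs : List (String × String)) : PySem.Dict String Int :=
  (pvGraphA invitationPairs).keys.foldl (fun sc current =>
    ((pvGraphA invitationPairs).getD current []).foldl (fun sc nxt =>
      if (pvGraphA invitationPairs).contains nxt then
        ((pvGraphA invitationPairs).getD nxt []).foldl (fun sc nn =>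
          if (pvGraphA invitationPairs).contains nn then
            sc.modify current 0 (fun v => v + (((pvGraphA invitationPairs).getD nn []).length : Int))
          else sc)
          (sc.modify current 0 (fun v => v + 3 * (((pvGraphA invitationPairs).getD nxt []).length : Int)))
      else sc)
      (sc.modify current 0 (fun v => v + 10 * (((pvGraphA invitationPairs).getD current []).length : Int))))
    PySem.Dict.empty

def solution (invitationPairs : List (String × String)) : List String :=
  let ranked := PySem.List.sorted (pvScoresA invitationPairs).items (fun x => x.2) true
  (PySem.List.slice ranked none (some 3)).map (fun x => x.1)

-- ===== PORT B =====
-- deg[s] = deg.get(s, 0) + 1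
def pvDegB (invitationPairs : List (String × String)) : PySem.Dict String Int :=
  invitationPairs.foldl (fun d p => d.insert p.1 (d.getD p.1 0 + 1)) PySem.Dict.empty

-- nbrsum[s] = nbrsum.get(s, 0) + deg.get(e, 0)
def pvNbrB (invitationPairs : List (String × String)) : PySem.Dict String Int :=
  invitationPairs.foldl (fun d p =>
    d.insert p.1 (d.getD p.1 0 + (pvDegB invitationPairs).getD p.2 0)) PySem.Dict.empty

-- score[s] = score.get(s, 10*deg[s] + 3*nbrsum[s]) + nbrsum.get(e, 0)
def pvScoreB (invitationPairs : List (String × String)) : PySem.Dict String Int :=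
  invitationPairs.foldl (fun d p =>
    d.insert p.1 (d.getD p.1
        (10 * (pvDegB invitationPairs).getD p.1 0 + 3 * (pvNbrB invitationPairs).getD p.1 0)
      + (pvNbrB invitationPairs).getD p.2 0)) PySem.Dict.empty

def solution_alt (invitationPairs : List (String × String)) : List String :=
  let ranked := PySem.List.sorted (pvScoreB invitationPairs).items (fun x => x.2) true
  (PySem.List.slice ranked none (some 3)).map (fun x => x.1)

-- ===== PRECONDITION & SPEC =====
def Spec_solution (invitationPairs : List (String × String)) (out : List String) : Prop := out = solution_alt invitationPairs
instance (invitationPairs : List (String × String)) (out : List String) : Decidable (Spec_solution invitationPairs out) := by unfold Spec_solution; infer_instance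

-- ===== CLAIM (what is proved, stated in full; the proofs are below) =====
def Claim_equal_solution : Prop := ∀ (invitationPairs : List (String × String)), Dom_solution invitationPairs → Spec_solution invitationPairs (solution invitationPairs)

-- ===== LEMMAS AND PROOFS =====

-- Pure characterizations: out-neighbors, out-degree, neighbor-degree sum, total score.
def pvN (ps : List (String × String)) (v : String) : List String :=
  (ps.filter (fun p => p.1 == v)).map (fun p => p.2)

def pvL (ps : List (String × String)) (v : String) : Int := ((pvN ps v).length : Int)

def pvM (ps : List (String × String)) (v : String) : Int := ((pvN ps v).map (pvL ps)).sum

def pvT (ps : List (String × String)) (v : String) : Int :=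
  10 * pvL ps v + ((pvN ps v).map (fun e => 3 * pvL ps e + pvM ps e)).sum

-- ---- graph facts ----
lemma pvGraphA_getD (ps : List (String × String)) (v : String) :
    (pvGraphA ps).getD v [] = pvN ps v := by
  simp only [pvGraphA, pvN]
  rw [PySem.Dict.getD_foldl_modify_append, PySem.Dict.getD_empty]
  rfl

lemma pvGraphA_keys (ps : List (String × String)) :
    (pvGraphA ps).keys = PySem.Set.ofList (ps.map (fun p => p.1)) := by
  simp only [pvGraphA]
  rw [PySem.Dict.keys_foldl_modify_key ps (fun p => p.1) [] (fun _ p => fun l => l ++ [p.2])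
    PySem.Dict.empty, PySem.Dict.keys_empty, PySem.Set.update_nil_left]

lemma contains_pvGraphA (ps : List (String × String)) (v : String) :
    (pvGraphA ps).contains v = true ↔ v ∈ ps.map (fun p => p.1) := by
  rw [PySem.Dict.contains_iff_mem_keys, pvGraphA_keys, PySem.Set.mem_ofList]

lemma pvN_eq_nil (ps : List (String × String)) (v : String)
    (h : v ∉ ps.map (fun p => p.1)) : pvN ps v = [] := by
  simp only [pvN, List.map_eq_nil_iff, List.filter_eq_nil_iff]
  intro a ha hb
  exact h (List.mem_map.mpr ⟨a, ha, by simpa using hb⟩)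

lemma pvL_eq_zero (ps : List (String × String)) (v : String)
    (h : v ∉ ps.map (fun p => p.1)) : pvL ps v = 0 := by
  simp [pvL, pvN_eq_nil ps v h]

lemma pvM_eq_zero (ps : List (String × String)) (v : String)
    (h : v ∉ ps.map (fun p => p.1)) : pvM ps v = 0 := by
  simp [pvM, pvN_eq_nil ps v h]

-- ---- generic dict-fold lemmas ----
-- A fold whose every step adds δ x at the fixed key c.
lemma dict_foldl_fixed {α : Type} (step : PySem.Dict String Int → α → PySem.Dict String Int)
    (δ : α → Int) (c : String)
    (h : ∀ sc x k, (step sc x).getD k 0 = sc.getD k 0 + (if k = c then δ x else 0)) :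
    ∀ (l : List α) (sc : PySem.Dict String Int) (k : String),
      (l.foldl step sc).getD k 0 = sc.getD k 0 + (if k = c then (l.map δ).sum else 0) := by
  intro l
  induction l with
  | nil => intro sc k; simp
  | cons p t ih =>
    intro sc k
    simp only [List.foldl_cons, List.map_cons, List.sum_cons]
    rw [ih, h]
    split_ifs <;> ring

-- A fold whose step at element c adds Δ c at key c.
lemma dict_foldl_self (step : PySem.Dict String Int → String → PySem.Dict String Int)
    (Δ : String → Int)
    (h : ∀ sc c k, (step sc c).getD k 0 = sc.getD k 0 + (if k = c then Δ c else 0)) :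
    ∀ (K : List String) (sc : PySem.Dict String Int) (k : String),
      (K.foldl step sc).getD k 0
        = sc.getD k 0 + ((K.filter (fun c => c == k)).map Δ).sum := by
  intro K
  induction K with
  | nil => intro sc k; simp
  | cons c t ih =>
    intro sc k
    simp only [List.foldl_cons, List.filter_cons]
    rw [ih, h]
    by_cases hc : c = k
    · subst hc
      rw [if_pos rfl, if_pos (beq_self_eq_true c)]
      simp only [List.map_cons, List.sum_cons]
      ring
    · rw [if_neg (fun hh : k = c => hc hh.symm),
        if_neg (show ¬((c == k) = true) by simp [hc])]
      ring

-- A fold whose steps never change the key list once c is a key.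
lemma dict_foldl_keys_inv {α : Type} (step : PySem.Dict String Int → α → PySem.Dict String Int)
    (c : String) (h : ∀ sc x, c ∈ sc.keys → (step sc x).keys = sc.keys) :
    ∀ (l : List α) (sc : PySem.Dict String Int), c ∈ sc.keys → (l.foldl step sc).keys = sc.keys := by
  intro l
  induction l with
  | nil => intro sc _; rfl
  | cons p t ih =>
    intro sc hc
    rw [List.foldl_cons, ih _ (by rw [h sc p hc]; exact hc), h sc p hc]

lemma keys_modify_of_mem (d : PySem.Dict String Int) (c : String) (f : Int → Int)
    (hc : c ∈ d.keys) : (d.modify c 0 f).keys = d.keys := by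
  rw [PySem.Dict.keys_modify,
    PySem.Dict.keys_insert_of_contains _ _ ((PySem.Dict.contains_iff_mem_keys _ _).mpr hc)]

-- ---- A-side score characterization ----
lemma inner2_h (ps : List (String × String)) (c : String) :
    ∀ (sc : PySem.Dict String Int) (x : String) (k : String),
      ((if (pvGraphA ps).contains x then
          sc.modify c 0 (fun v => v + (((pvGraphA ps).getD x []).length : Int))
        else sc)).getD k 0
      = sc.getD k 0 + (if k = c then pvL ps x else 0) := by
  intro sc x k
  by_cases hx : (pvGraphA ps).contains x = true
  · have hlen : (((pvGraphA ps).getD x []).length : Int) = pvL ps x := by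
      rw [pvGraphA_getD]; rfl
    rw [if_pos hx, PySem.Dict.getD_modify]
    by_cases h : k = c
    · subst h
      rw [hlen]
      split_ifs <;> first | rfl | ring
    · split_ifs; ring
  · have hx' : x ∉ ps.map (fun p => p.1) := fun hm => hx ((contains_pvGraphA ps x).mpr hm)
    rw [if_neg hx, pvL_eq_zero ps x hx']
    split_ifs <;> ring

lemma inner1_h (ps : List (String × String)) (c : String) :
    ∀ (sc : PySem.Dict String Int) (x : String) (k : String),
      ((if (pvGraphA ps).contains x then
          ((pvGraphA ps).getD x []).foldl (fun sc nn =>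
            if (pvGraphA ps).contains nn then
              sc.modify c 0 (fun v => v + (((pvGraphA ps).getD nn []).length : Int))
            else sc)
            (sc.modify c 0 (fun v => v + 3 * (((pvGraphA ps).getD x []).length : Int)))
        else sc)).getD k 0
      = sc.getD k 0 + (if k = c then 3 * pvL ps x + pvM ps x else 0) := by
  intro sc x k
  by_cases hx : (pvGraphA ps).contains x = true
  · rw [if_pos hx, dict_foldl_fixed _ (pvL ps) c (inner2_h ps c), PySem.Dict.getD_modify,
      pvGraphA_getD]
    have hlen2 : ((pvN ps x).length : Int) = pvL ps x := rfl
    have hM : ((pvN ps x).map (pvL ps)).sum = pvM ps x := rfl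
    by_cases h : k = c
    · subst h
      rw [hM, hlen2]
      split_ifs <;> first | rfl | ring
    · split_ifs; rfl
  · have hx' : x ∉ ps.map (fun p => p.1) := fun hm => hx ((contains_pvGraphA ps x).mpr hm)
    rw [if_neg hx, pvL_eq_zero ps x hx', pvM_eq_zero ps x hx']
    split_ifs <;> ring

lemma bodyA_h (ps : List (String × String)) :
    ∀ (sc : PySem.Dict String Int) (c : String) (k : String),
      (((pvGraphA ps).getD c []).foldl (fun sc nxt =>
          if (pvGraphA ps).contains nxt then
            ((pvGraphA ps).getD nxt []).foldl (fun sc nn =>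
              if (pvGraphA ps).contains nn then
                sc.modify c 0 (fun v => v + (((pvGraphA ps).getD nn []).length : Int))
              else sc)
              (sc.modify c 0 (fun v => v + 3 * (((pvGraphA ps).getD nxt []).length : Int)))
          else sc)
        (sc.modify c 0 (fun v => v + 10 * (((pvGraphA ps).getD c []).length : Int)))).getD k 0
      = sc.getD k 0 + (if k = c then pvT ps c else 0) := by
  intro sc c k
  rw [dict_foldl_fixed _ (fun e => 3 * pvL ps e + pvM ps e) c (inner1_h ps c),
    PySem.Dict.getD_modify, pvGraphA_getD]
  have hlen2 : ((pvN ps c).length : Int) = pvL ps c := rfl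
  by_cases h : k = c
  · subst h
    rw [hlen2]
    simp only [pvT]
    split_ifs <;> first | rfl | ring
  · split_ifs; rfl

lemma filter_beq_singleton :
    ∀ (K : List String) (k : String), K.Nodup → k ∈ K → K.filter (fun c => c == k) = [k] := by
  intro K
  induction K with
  | nil => intro k _ hk; cases hk
  | cons c t ih =>
    intro k hnd hk
    rw [List.filter_cons]
    rcases List.mem_cons.mp hk with h | h
    · subst h
      rw [if_pos (beq_self_eq_true k)]
      have hnt : k ∉ t := (List.nodup_cons.mp hnd).1
      have : t.filter (fun c => c == k) = [] := by
        rw [List.filter_eq_nil_iff]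
        intro a ha hb
        have hak : a = k := by simpa using hb
        exact hnt (hak ▸ ha)
      rw [this]
    · have hck : ¬((c == k) = true) := by
        simp only [beq_iff_eq]
        intro hh
        exact (List.nodup_cons.mp hnd).1 (hh ▸ h)
      rw [if_neg hck, ih k (List.nodup_cons.mp hnd).2 h]

lemma pvScoresA_getD (ps : List (String × String)) (k : String)
    (hk : k ∈ (pvGraphA ps).keys) : (pvScoresA ps).getD k 0 = pvT ps k := by
  have hnd : (pvGraphA ps).keys.Nodup := by
    rw [pvGraphA_keys]; exact PySem.Set.nodup_ofList _
  rw [pvScoresA, dict_foldl_self _ (pvT ps) (bodyA_h ps), PySem.Dict.getD_empty,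
    filter_beq_singleton _ k hnd hk]
  simp

-- keys of the A-side score dict
lemma bodyA_keys (ps : List (String × String)) (sc : PySem.Dict String Int) (c : String) :
    ((((pvGraphA ps).getD c []).foldl (fun sc nxt =>
        if (pvGraphA ps).contains nxt then
          ((pvGraphA ps).getD nxt []).foldl (fun sc nn =>
            if (pvGraphA ps).contains nn then
              sc.modify c 0 (fun v => v + (((pvGraphA ps).getD nn []).length : Int))
            else sc)
            (sc.modify c 0 (fun v => v + 3 * (((pvGraphA ps).getD nxt []).length : Int)))
        else sc)
      (sc.modify c 0 (fun v => v + 10 * (((pvGraphA ps).getD c []).length : Int)))).keys)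
    = PySem.Set.add sc.keys c := by
  have hmem : c ∈ (sc.modify c 0 (fun v => v + 10 * (((pvGraphA ps).getD c []).length : Int))).keys := by
    rw [PySem.Dict.keys_modify]
    by_cases hc : sc.contains c = true
    · rw [PySem.Dict.keys_insert_of_contains _ _ hc]
      exact (PySem.Dict.contains_iff_mem_keys _ _).mp hc
    · rw [PySem.Dict.keys_insert_of_not_contains _ _ (by simpa using hc)]
      simp
  have hstep : ∀ (sc' : PySem.Dict String Int) (x : String), c ∈ sc'.keys →
      ((if (pvGraphA ps).contains x then
          ((pvGraphA ps).getD x []).foldl (fun sc nn =>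
            if (pvGraphA ps).contains nn then
              sc.modify c 0 (fun v => v + (((pvGraphA ps).getD nn []).length : Int))
            else sc)
            (sc'.modify c 0 (fun v => v + 3 * (((pvGraphA ps).getD x []).length : Int)))
        else sc')).keys = sc'.keys := by
    intro sc' x hc
    by_cases hx : (pvGraphA ps).contains x = true
    · simp only [hx, if_true]
      have hin : ∀ (sc'' : PySem.Dict String Int) (nn : String), c ∈ sc''.keys →
          ((if (pvGraphA ps).contains nn then
              sc''.modify c 0 (fun v => v + (((pvGraphA ps).getD nn []).length : Int))
            else sc'')).keys = sc''.keys := by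
        intro sc'' nn hc''
        by_cases hnn : (pvGraphA ps).contains nn = true
        · simp only [hnn, if_true]; exact keys_modify_of_mem _ _ _ hc''
        · simp [hnn]
      rw [dict_foldl_keys_inv _ c hin _ _ (by rw [keys_modify_of_mem _ _ _ hc]; exact hc),
        keys_modify_of_mem _ _ _ hc]
    · simp [hx]
  rw [dict_foldl_keys_inv _ c hstep _ _ hmem]
  rw [PySem.Dict.keys_modify]
  by_cases hc : sc.contains c = true
  · rw [PySem.Dict.keys_insert_of_contains _ _ hc]
    have hmemk : c ∈ sc.keys := (PySem.Dict.contains_iff_mem_keys _ _).mp hc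
    simp only [PySem.Set.add, PySem.Set.contains, List.contains_iff_mem, if_pos hmemk]
  · rw [PySem.Dict.keys_insert_of_not_contains _ _ (by simpa using hc)]
    have hnm : c ∉ sc.keys := fun hm => hc ((PySem.Dict.contains_iff_mem_keys _ _).mpr hm)
    simp only [PySem.Set.add, PySem.Set.contains, List.contains_iff_mem, if_neg hnm]

lemma pvScoresA_keys (ps : List (String × String)) :
    (pvScoresA ps).keys = (pvGraphA ps).keys := by
  have aux : ∀ (K : List String) (sc : PySem.Dict String Int),
      ((K.foldl (fun sc current =>
        ((pvGraphA ps).getD current []).foldl (fun sc nxt =>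
          if (pvGraphA ps).contains nxt then
            ((pvGraphA ps).getD nxt []).foldl (fun sc nn =>
              if (pvGraphA ps).contains nn then
                sc.modify current 0 (fun v => v + (((pvGraphA ps).getD nn []).length : Int))
              else sc)
              (sc.modify current 0 (fun v => v + 3 * (((pvGraphA ps).getD nxt []).length : Int)))
          else sc)
          (sc.modify current 0 (fun v => v + 10 * (((pvGraphA ps).getD current []).length : Int))))
        sc).keys) = PySem.Set.update sc.keys K := by
    intro K
    induction K with
    | nil => intro sc; rfl
    | cons c t ih =>
      intro sc
      rw [List.foldl_cons, ih, bodyA_keys]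
      rfl
  rw [pvScoresA, aux, PySem.Dict.keys_empty, PySem.Set.update_nil_left, pvGraphA_keys,
    PySem.Set.ofList_ofList]

lemma pvScoresA_items (ps : List (String × String)) :
    (pvScoresA ps).items
      = (PySem.Set.ofList (ps.map (fun p => p.1))).map (fun k => (k, pvT ps k)) := by
  have hnd : (pvScoresA ps).keys.Nodup := by
    rw [pvScoresA_keys, pvGraphA_keys]; exact PySem.Set.nodup_ofList _
  rw [PySem.Dict.items_eq_map_keys _ hnd 0, pvScoresA_keys, pvGraphA_keys]
  refine List.map_congr_left (fun k hk => ?_)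
  rw [pvScoresA_getD ps k (by rw [pvGraphA_keys]; exact hk)]

-- ---- B-side score characterization ----
lemma pvDegB_getD_aux :
    ∀ (l : List (String × String)) (d : PySem.Dict String Int) (k : String),
      (l.foldl (fun d p => d.insert p.1 (d.getD p.1 0 + 1)) d).getD k 0
        = d.getD k 0 + ((l.filter (fun p => p.1 == k)).length : Int) := by
  intro l
  induction l with
  | nil => intro d k; simp
  | cons p t ih =>
    intro d k
    rw [List.foldl_cons, ih, List.filter_cons, PySem.Dict.getD_insert]
    by_cases hp : p.1 = k
    · subst hp
      rw [if_pos rfl, if_pos (beq_self_eq_true p.1)]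
      simp only [List.length_cons]
      push_cast; ring
    · rw [if_neg (fun hh : k = p.1 => hp hh.symm),
        if_neg (show ¬((p.1 == k) = true) by simp [hp])]

lemma pvDegB_getD (ps : List (String × String)) (v : String) :
    (pvDegB ps).getD v 0 = pvL ps v := by
  rw [pvDegB, pvDegB_getD_aux ps PySem.Dict.empty v, PySem.Dict.getD_empty]
  simp [pvL, pvN]

lemma pvNbrB_getD_aux (ps : List (String × String)) :
    ∀ (l : List (String × String)) (d : PySem.Dict String Int) (k : String),
      (l.foldl (fun d p => d.insert p.1 (d.getD p.1 0 + (pvDegB ps).getD p.2 0)) d).getD k 0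
        = d.getD k 0 + ((l.filter (fun p => p.1 == k)).map (fun p => (pvDegB ps).getD p.2 0)).sum := by
  intro l
  induction l with
  | nil => intro d k; simp
  | cons p t ih =>
    intro d k
    rw [List.foldl_cons, ih, List.filter_cons, PySem.Dict.getD_insert]
    by_cases hp : p.1 = k
    · subst hp
      rw [if_pos rfl, if_pos (beq_self_eq_true p.1)]
      simp only [List.map_cons, List.sum_cons]
      ring
    · rw [if_neg (fun hh : k = p.1 => hp hh.symm),
        if_neg (show ¬((p.1 == k) = true) by simp [hp])]

lemma pvNbrB_getD (ps : List (String × String)) (v : String) :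
    (pvNbrB ps).getD v 0 = pvM ps v := by
  rw [pvNbrB, pvNbrB_getD_aux ps ps PySem.Dict.empty v, PySem.Dict.getD_empty]
  simp only [pvM, pvN, List.map_map, zero_add]
  refine congrArg _ (List.map_congr_left (fun p _ => ?_))
  simp [pvDegB_getD]

lemma pvScoreB_get?_some (ps : List (String × String)) :
    ∀ (l : List (String × String)) (d : PySem.Dict String Int) (k : String) (v : Int),
      d.get? k = some v →
      (l.foldl (fun d p =>
          d.insert p.1 (d.getD p.1
              (10 * (pvDegB ps).getD p.1 0 + 3 * (pvNbrB ps).getD p.1 0)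
            + (pvNbrB ps).getD p.2 0)) d).get? k
        = some (v + ((l.filter (fun p => p.1 == k)).map (fun p => (pvNbrB ps).getD p.2 0)).sum) := by
  intro l
  induction l with
  | nil => intro d k v hv; simpa using hv
  | cons p t ih =>
    intro d k v hv
    rw [List.foldl_cons, List.filter_cons]
    by_cases hp : p.1 = k
    · subst hp
      have hgd : d.getD p.1 (10 * (pvDegB ps).getD p.1 0 + 3 * (pvNbrB ps).getD p.1 0) = v :=
        PySem.Dict.getD_of_get?_eq_some _ _ hv
      have h1 : (d.insert p.1 (d.getD p.1
            (10 * (pvDegB ps).getD p.1 0 + 3 * (pvNbrB ps).getD p.1 0)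
          + (pvNbrB ps).getD p.2 0)).get? p.1 = some (v + (pvNbrB ps).getD p.2 0) := by
        rw [PySem.Dict.get?_insert_self, hgd]
      rw [ih _ _ _ h1, if_pos (beq_self_eq_true p.1)]
      simp only [List.map_cons, List.sum_cons]
      congr 1
      ring
    · have h1 : (d.insert p.1 (d.getD p.1
            (10 * (pvDegB ps).getD p.1 0 + 3 * (pvNbrB ps).getD p.1 0)
          + (pvNbrB ps).getD p.2 0)).get? k = some v := by
        rw [PySem.Dict.get?_insert_of_ne _ _ (fun hh : k = p.1 => hp hh.symm)]
        exact hv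
      rw [ih _ _ _ h1, if_neg (show ¬((p.1 == k) = true) by simp [hp])]

lemma pvScoreB_get?_none (ps : List (String × String)) :
    ∀ (l : List (String × String)) (d : PySem.Dict String Int) (k : String),
      d.get? k = none →
      (l.foldl (fun d p =>
          d.insert p.1 (d.getD p.1
              (10 * (pvDegB ps).getD p.1 0 + 3 * (pvNbrB ps).getD p.1 0)
            + (pvNbrB ps).getD p.2 0)) d).get? k
        = if k ∈ l.map (fun p => p.1) then
            some ((10 * (pvDegB ps).getD k 0 + 3 * (pvNbrB ps).getD k 0)
              + ((l.filter (fun p => p.1 == k)).map (fun p => (pvNbrB ps).getD p.2 0)).sum)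
          else none := by
  intro l
  induction l with
  | nil => intro d k hv; simpa using hv
  | cons p t ih =>
    intro d k hv
    rw [List.foldl_cons, List.filter_cons]
    by_cases hp : p.1 = k
    · subst hp
      have hgd : d.getD p.1 (10 * (pvDegB ps).getD p.1 0 + 3 * (pvNbrB ps).getD p.1 0)
          = 10 * (pvDegB ps).getD p.1 0 + 3 * (pvNbrB ps).getD p.1 0 :=
        PySem.Dict.getD_of_get?_eq_none _ _ hv
      have h1 : (d.insert p.1 (d.getD p.1
            (10 * (pvDegB ps).getD p.1 0 + 3 * (pvNbrB ps).getD p.1 0)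
          + (pvNbrB ps).getD p.2 0)).get? p.1
          = some ((10 * (pvDegB ps).getD p.1 0 + 3 * (pvNbrB ps).getD p.1 0)
              + (pvNbrB ps).getD p.2 0) := by
        rw [PySem.Dict.get?_insert_self, hgd]
      rw [pvScoreB_get?_some ps t _ _ _ h1,
        if_pos (show p.1 ∈ (p :: t).map (fun p => p.1) from List.mem_cons_self ..),
        if_pos (beq_self_eq_true p.1)]
      simp only [List.map_cons, List.sum_cons]
      congr 1
      ring
    · have h1 : (d.insert p.1 (d.getD p.1
            (10 * (pvDegB ps).getD p.1 0 + 3 * (pvNbrB ps).getD p.1 0)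
          + (pvNbrB ps).getD p.2 0)).get? k = none := by
        rw [PySem.Dict.get?_insert_of_ne _ _ (fun hh : k = p.1 => hp hh.symm)]
        exact hv
      rw [ih _ _ h1, if_neg (show ¬((p.1 == k) = true) by simp [hp])]
      have hmem : (k ∈ (p :: t).map (fun p => p.1)) ↔ (k ∈ t.map (fun p => p.1)) := by
        rw [List.map_cons, List.mem_cons]
        exact ⟨fun h => h.resolve_left (fun hh => hp hh.symm), Or.inr⟩
      by_cases hm : k ∈ t.map (fun p => p.1)
      · rw [if_pos hm, if_pos (hmem.mpr hm)]
      · rw [if_neg hm, if_neg (fun hh => hm (hmem.mp hh))]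

lemma pvScoreB_getD (ps : List (String × String)) (k : String)
    (hk : k ∈ ps.map (fun p => p.1)) : (pvScoreB ps).getD k 0 = pvT ps k := by
  rw [PySem.Dict.getD_eq_get?_getD, pvScoreB,
    pvScoreB_get?_none ps ps PySem.Dict.empty k (PySem.Dict.get?_empty k), if_pos hk]
  simp only [Option.getD_some, pvT, pvDegB_getD, pvNbrB_getD]
  have h1 : ((ps.filter (fun p => p.1 == k)).map (fun p => pvM ps p.2)).sum
      = ((pvN ps k).map (pvM ps)).sum := by
    simp only [pvN, List.map_map]
    rfl
  rw [h1]
  have h2 : ((pvN ps k).map (fun e => 3 * pvL ps e + pvM ps e)).sum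
      = 3 * ((pvN ps k).map (pvL ps)).sum + ((pvN ps k).map (pvM ps)).sum := by
    rw [List.sum_map_add]
    congr 1
    rw [← List.sum_map_mul_left]
  rw [h2]
  have h3 : ((pvN ps k).map (pvL ps)).sum = pvM ps k := rfl
  rw [h3]; ring

lemma pvScoreB_keys (ps : List (String × String)) :
    (pvScoreB ps).keys = PySem.Set.ofList (ps.map (fun p => p.1)) := by
  rw [pvScoreB, PySem.Dict.keys_foldl_insert_key ps (fun p => p.1)
    (fun d p => d.getD p.1
        (10 * (pvDegB ps).getD p.1 0 + 3 * (pvNbrB ps).getD p.1 0)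
      + (pvNbrB ps).getD p.2 0) PySem.Dict.empty,
    PySem.Dict.keys_empty, PySem.Set.update_nil_left]

lemma pvScoreB_items (ps : List (String × String)) :
    (pvScoreB ps).items
      = (PySem.Set.ofList (ps.map (fun p => p.1))).map (fun k => (k, pvT ps k)) := by
  have hnd : (pvScoreB ps).keys.Nodup := by
    rw [pvScoreB_keys]; exact PySem.Set.nodup_ofList _
  rw [PySem.Dict.items_eq_map_keys _ hnd 0, pvScoreB_keys]
  refine List.map_congr_left (fun k hk => ?_)
  rw [pvScoreB_getD ps k ((PySem.Set.mem_ofList _ _).mp hk)]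

-- ===== VERDICT (by name: the statement is the Claim_ definition above) =====
theorem solution_spec : Claim_equal_solution := by
  intro ps _
  unfold Spec_solution solution solution_alt
  rw [pvScoresA_items, pvScoreB_items]
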